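-- pv_equiv track=rewrite | github.com/manasdodya/python-practice | gfg-160-days/8-Prefix-Sum/Bonus-1-Number-of-times-graph-cuts-x-axis.py | count_x_axis_crossings
-- ===== SOURCE A (Python) =====
-- def count_x_axis_crossings(arr):
--     position = 0  # Starting at the origin
--     crossings = 0  # Count of X-axis crossings
--     prev_position = 0  # Tracks the previous position
--
--     for num in arr:
--         prev_position = position  # Store the previous position
--         position += num  # Update the current position
--
--         # If previous position was above/below 0 and now it's the opposite side or exactly 0
--         if (prev_position > 0 and position <= 0) or (prev_position < 0 and position >= 0):
--             crossings += 1  # X-axis crossed or touched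
--
--     return crossings
-- ===== SOURCE B (Python) =====
-- from itertools import accumulate, groupby
--
-- def count_x_axis_crossings(arr):
--     # Run-length view: compress the sign (-1/0/+1) sequence of the prefix sums
--     # (origin included) into its runs; every run boundary leaving a nonzero-sign
--     # run is exactly one crossing/touch of the x-axis.
--     signs = [(p > 0) - (p < 0) for p in accumulate(arr, initial=0)]
--     runs = [s for s, _ in groupby(signs)]
--     return sum(1 for s in runs[:-1] if s != 0)
-- ===== Notes on version B (the rewrite author's own statement) =====
-- stated objective: alternative
-- what changed: B computes the sign (-1/0/+1) sequence of the prefix sums, run-length-compresses it with itertools.groupby, and counts the runs before the last whose sign is nonzero, replacing A's stateful per-step crossing test entirely.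
import Mathlib
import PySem

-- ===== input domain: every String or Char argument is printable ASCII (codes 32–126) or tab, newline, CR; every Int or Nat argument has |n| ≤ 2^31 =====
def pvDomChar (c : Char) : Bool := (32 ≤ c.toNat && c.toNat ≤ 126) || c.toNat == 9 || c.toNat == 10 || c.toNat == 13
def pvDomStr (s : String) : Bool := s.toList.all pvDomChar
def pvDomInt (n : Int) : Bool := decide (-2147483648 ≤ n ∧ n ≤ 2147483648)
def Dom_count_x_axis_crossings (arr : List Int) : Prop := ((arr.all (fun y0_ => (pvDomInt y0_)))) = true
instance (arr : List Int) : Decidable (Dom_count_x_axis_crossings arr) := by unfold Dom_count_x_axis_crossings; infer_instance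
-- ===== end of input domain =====

-- B run-length-compresses the sign sequence of the prefix sums and counts
-- nonzero-sign runs before the last, replacing A's per-step crossing test; alternative algorithm, same cost.

-- ===== PORT A =====
-- state = (position, crossings); prev_position is position before the update
def count_x_axis_crossings (arr : List Int) : Int :=
  (arr.foldl (fun (st : Int × Int) num =>
      let prev_position := st.1
      let position := st.1 + num
      if (prev_position > 0 ∧ position ≤ 0) ∨ (prev_position < 0 ∧ position ≥ 0) then
        (position, st.2 + 1)
      else
        (position, st.2)) (0, 0)).2

-- ===== PORT B =====
-- (p > 0) - (p < 0)
def pvSign (p : Int) : Int := (if p > 0 then 1 else 0) - (if p < 0 then 1 else 0)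

-- keys of itertools.groupby: adjacent run-length compression
def pvRunKeys : List Int → List Int
  | [] => []
  | [x] => [x]
  | x :: y :: t => if x = y then pvRunKeys (y :: t) else x :: pvRunKeys (y :: t)

-- accumulate(arr, initial=0) = List.scanl (·+·) 0 arr; runs[:-1] = dropLast
def count_x_axis_crossings_alt (arr : List Int) : Int :=
  let signs := (List.scanl (· + ·) 0 arr).map pvSign
  let runs := pvRunKeys signs
  ((runs.dropLast).filter (fun s => s ≠ 0)).length

-- ===== PRECONDITION & SPEC =====
def Spec_count_x_axis_crossings (arr : List Int) (out : Int) : Prop := out = count_x_axis_crossings_alt arr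
instance (arr : List Int) (out : Int) : Decidable (Spec_count_x_axis_crossings arr out) := by unfold Spec_count_x_axis_crossings; infer_instance

-- ===== CLAIM (what is proved, stated in full; the proofs are below) =====
def Claim_equal_count_x_axis_crossings : Prop := ∀ (arr : List Int), Dom_count_x_axis_crossings arr → Spec_count_x_axis_crossings arr (count_x_axis_crossings arr)

-- ===== LEMMAS AND PROOFS =====

-- proof-only intermediate: count adjacent pairs (a,b) with a ≠ 0 and a ≠ b
def pvCnt : List Int → Nat
  | [] => 0
  | [_] => 0
  | a :: b :: t => (if a ≠ 0 ∧ a ≠ b then 1 else 0) + pvCnt (b :: t)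

theorem pvRunKeys_cons (t : List Int) : ∀ (y : Int), ∃ d, pvRunKeys (y :: t) = y :: d := by
  induction t with
  | nil => intro y; exact ⟨[], rfl⟩
  | cons z t' ih =>
    intro y
    obtain ⟨d, hd⟩ := ih z
    by_cases h : y = z
    · subst h; exact ⟨d, by simp [pvRunKeys, hd]⟩
    · exact ⟨pvRunKeys (z :: t'), by simp [pvRunKeys, h]⟩

theorem pvCnt_eq_runs (l : List Int) :
    pvCnt l = (((pvRunKeys l).dropLast).filter (fun s => s ≠ 0)).length := by
  induction l with
  | nil => simp [pvCnt, pvRunKeys]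
  | cons x t ih =>
    cases t with
    | nil => simp [pvCnt, pvRunKeys]
    | cons y t' =>
      obtain ⟨d, hd⟩ := pvRunKeys_cons t' y
      by_cases h : x = y
      · subst h
        simp only [pvCnt, pvRunKeys]
        have : ¬ (x ≠ 0 ∧ x ≠ x) := by simp
        rw [if_neg this, ih]
        simp
      · have hr : pvRunKeys (x :: y :: t') = x :: pvRunKeys (y :: t') := by
          simp [pvRunKeys, h]
        have hdl : (x :: pvRunKeys (y :: t')).dropLast
            = x :: (pvRunKeys (y :: t')).dropLast := by
          rw [hd]; rfl
        simp only [pvCnt, hr, hdl, List.filter_cons]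
        by_cases hx : x = 0
        · subst hx
          have : ¬ ((0:Int) ≠ 0 ∧ (0:Int) ≠ y) := by simp
          rw [if_neg this, ih]; simp
        · have hcond : ((x:Int) ≠ 0 ∧ x ≠ y) := ⟨hx, h⟩
          rw [if_pos hcond, ih]
          simp [hx]
          omega

theorem pvSign_cond (p n : Int) :
    ((p > 0 ∧ p + n ≤ 0) ∨ (p < 0 ∧ p + n ≥ 0)) ↔ (pvSign p ≠ 0 ∧ pvSign p ≠ pvSign (p + n)) := by
  unfold pvSign
  split_ifs <;> omega

theorem crossings_loop_eq (arr : List Int) : ∀ (p c : Int),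
    (arr.foldl (fun (st : Int × Int) num =>
      let prev_position := st.1
      let position := st.1 + num
      if (prev_position > 0 ∧ position ≤ 0) ∨ (prev_position < 0 ∧ position ≥ 0) then
        (position, st.2 + 1)
      else
        (position, st.2)) (p, c)).2 =
    c + pvCnt ((List.scanl (· + ·) p arr).map pvSign) := by
  induction arr with
  | nil => intro p c; simp [List.scanl_nil, List.map, pvCnt]
  | cons n t ih =>
    intro p c
    have hs : List.scanl (· + ·) (p + n) t = (p + n) :: (List.scanl (· + ·) (p + n) t).tail := by
      cases t <;> simp [List.scanl_nil, List.scanl_cons]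
    have hmap : (List.scanl (· + ·) p (n :: t)).map pvSign
        = pvSign p :: pvSign (p + n) :: ((List.scanl (· + ·) (p + n) t).tail).map pvSign := by
      rw [List.scanl_cons]
      conv_lhs => rw [hs]
      simp [List.map]
    have hcnt : pvCnt ((List.scanl (· + ·) p (n :: t)).map pvSign)
        = (if pvSign p ≠ 0 ∧ pvSign p ≠ pvSign (p + n) then 1 else 0)
          + pvCnt ((List.scanl (· + ·) (p + n) t).map pvSign) := by
      rw [hmap]
      conv_rhs => rw [hs]
      simp [pvCnt, List.map]
    rw [hcnt]
    simp only [List.foldl_cons]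
    by_cases h : (p > 0 ∧ p + n ≤ 0) ∨ (p < 0 ∧ p + n ≥ 0)
    · have h' : pvSign p ≠ 0 ∧ pvSign p ≠ pvSign (p + n) := (pvSign_cond p n).mp h
      rw [if_pos h', if_pos h, ih (p + n) (c + 1)]
      push_cast; ring
    · have h' : ¬ (pvSign p ≠ 0 ∧ pvSign p ≠ pvSign (p + n)) := fun hh => h ((pvSign_cond p n).mpr hh)
      rw [if_neg h', if_neg h, ih (p + n) c]
      push_cast; ring

-- ===== VERDICT (by name: the statement is the Claim_ definition above) =====
theorem count_x_axis_crossings_spec : Claim_equal_count_x_axis_crossings := by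
  intro arr _
  unfold Spec_count_x_axis_crossings count_x_axis_crossings count_x_axis_crossings_alt
  rw [crossings_loop_eq, pvCnt_eq_runs]
  dsimp only
  omega
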